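-- pv_equiv track=rewrite | github.com/nvax-r/scx | scheds/rust/scx_invariant/analysis/report.py | _cpu_render_order
-- ===== SOURCE A (Python) =====
-- def _cpu_render_order(topology: list, nr_cpus: int) -> tuple:
--     """Return (cpu_order, numa_breaks) for the heatmap's row layout.
--
--     cpu_order: list of cpu_ids in render order (top → bottom).
--     numa_breaks: list of row indices where a NUMA block transition starts;
--                  the renderer draws a thin separator above each.
--
--     Defensive fallbacks:
--       - empty topology  → natural [0, nr_cpus) order, no separators.
--       - cpu_ids in [0, nr_cpus) missing from topology → appended at end
--         (synthetic numa/llc = -1) so the heatmap row count always matches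
--         nr_cpus.
--     """
--     if not topology:
--         return list(range(nr_cpus)), []
--
--     by_cpu = {t["cpu_id"]: t for t in topology}
--     seen = set(by_cpu.keys())
--     sorted_known = sorted(
--         topology, key=lambda t: (t["numa_id"], t["llc_id"], t["cpu_id"])
--     )
--     cpu_order = [t["cpu_id"] for t in sorted_known]
--     # Append any CPU id in [0, nr_cpus) that the topology section omitted.
--     for c in range(nr_cpus):
--         if c not in seen:
--             cpu_order.append(c)
--
--     numa_breaks: list = []
--     prev_numa = None
--     for i, c in enumerate(cpu_order):
--         cur_numa = by_cpu.get(c, {}).get("numa_id")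
--         if i > 0 and cur_numa != prev_numa:
--             numa_breaks.append(i)
--         prev_numa = cur_numa
--     return cpu_order, numa_breaks
-- ===== SOURCE B (Python) =====
-- def _cpu_render_order(topology: list, nr_cpus: int) -> tuple:
--     """Bucket rows by numa_id (sorted blocks of sorted (llc,cpu) pairs);
--     numa_breaks are the prefix sums of block sizes, no adjacent-scan."""
--     if not topology:
--         return list(range(nr_cpus)), []
--     by_cpu = {t["cpu_id"]: t for t in topology}
--     blocks = []
--     for numa in sorted({t["numa_id"] for t in topology}):
--         pairs = sorted((t["llc_id"], t["cpu_id"])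
--                        for t in topology if t["numa_id"] == numa)
--         blocks.append([c for _, c in pairs])
--     missing = [c for c in range(nr_cpus) if c not in by_cpu]
--     if missing:
--         blocks.append(missing)
--     cpu_order = [c for b in blocks for c in b]
--     numa_breaks, off = [], 0
--     for b in blocks[:-1]:
--         off += len(b)
--         numa_breaks.append(off)
--     return cpu_order, numa_breaks
-- ===== Notes on version B (the rewrite author's own statement) =====
-- stated objective: alternative
-- what changed: B never runs A's flat sort of topology entries nor its adjacent prev_numa scan: it buckets rows by numa_id (sorted distinct numa blocks, each a sort of bare (llc,cpu) pairs, plus one missing-CPU block) and reads numa_breaks off as prefix sums of the block lengths.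
import Mathlib
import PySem

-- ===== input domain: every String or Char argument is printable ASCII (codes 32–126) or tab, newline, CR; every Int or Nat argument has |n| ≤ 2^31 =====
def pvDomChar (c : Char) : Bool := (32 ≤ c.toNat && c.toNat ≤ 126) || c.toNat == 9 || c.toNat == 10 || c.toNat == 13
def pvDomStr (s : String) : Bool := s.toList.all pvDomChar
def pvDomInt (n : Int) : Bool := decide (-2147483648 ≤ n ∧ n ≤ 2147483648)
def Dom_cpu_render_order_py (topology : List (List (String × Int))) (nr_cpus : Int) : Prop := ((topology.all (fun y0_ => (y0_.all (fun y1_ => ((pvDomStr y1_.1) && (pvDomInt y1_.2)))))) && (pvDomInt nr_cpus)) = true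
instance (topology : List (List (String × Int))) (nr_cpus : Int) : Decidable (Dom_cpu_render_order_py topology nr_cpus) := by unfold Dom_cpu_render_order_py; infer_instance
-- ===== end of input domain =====

-- B replaces A's flat entry sort + adjacent prev_numa scan by numa buckets (sorted (llc,cpu)
-- pairs per block) with numa_breaks read off as prefix sums of block lengths. (objective: alternative)

-- ===== PORT A =====
-- t["k"] on an inner dict t (Python dict ↔ assoc list, later duplicates overwrite): exact via PySem.Dict.ofList/get?.
def pvTGet (t : List (String × Int)) (k : String) : Option Int :=
  PySem.Dict.get? (PySem.Dict.ofList t) k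

-- t["k"] where Pre_ guarantees the key is present (KeyError is excluded by Pre_), so the default is never read.
def pvTGetD (t : List (String × Int)) (k : String) : Int := (pvTGet t k).getD 0

-- Python's key lambda t: (t["numa_id"], t["llc_id"], t["cpu_id"])
def pvATriple (t : List (String × Int)) : Int × Int × Int :=
  (pvTGetD t "numa_id", pvTGetD t "llc_id", pvTGetD t "cpu_id")

-- Python's lexicographic '<' on int triples (Mathlib's Prod '<' is pointwise, so spelled out)
def pvLex3 (p q : Int × Int × Int) : Bool :=
  decide (p.1 < q.1) || (p.1 == q.1 && (decide (p.2.1 < q.2.1) || (p.2.1 == q.2.1 && decide (p.2.2 < q.2.2))))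

-- {t["cpu_id"]: t for t in topology} — insertion-ordered dict, later duplicates overwrite
def pvByCpu (topology : List (List (String × Int))) : PySem.Dict Int (List (String × Int)) :=
  topology.foldl (fun d t => d.insert (pvTGetD t "cpu_id") t) PySem.Dict.empty

def cpu_render_order_py (topology : List (List (String × Int))) (nr_cpus : Int) : List Int × List Int :=
  if topology = [] then (PySem.List.pyRange 0 nr_cpus 1, []) else
  let by_cpu : PySem.Dict Int (List (String × Int)) := pvByCpu topology
  let seen : PySem.Set Int := PySem.Set.ofList by_cpu.keys
  -- sorted(topology, key=…): a stable insertion sort by the strict tuple comparison,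
  -- PySem.List.sorted's own normal form (PySem.List.sorted_eq_foldl_insertBy)
  let sorted_known : List (List (String × Int)) :=
    topology.foldl (fun acc t => PySem.List.insertBy (fun a b => pvLex3 (pvATriple a) (pvATriple b)) t acc) []
  let cpu_order0 : List Int := sorted_known.map (fun t => pvTGetD t "cpu_id")
  let cpu_order : List Int := (PySem.List.pyRange 0 nr_cpus 1).foldl
    (fun acc c => if !(PySem.Set.contains seen c) then acc ++ [c] else acc) cpu_order0
  -- by_cpu.get(c, {}).get("numa_id"): missing cpu ⇒ none, exactly Python's None
  let res := (PySem.List.enumerate cpu_order 0).foldl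
    (fun (st : List Int × Option Int) p =>
      ((if decide (0 < p.1) && (pvTGet (PySem.Dict.getD by_cpu p.2 []) "numa_id" != st.2)
          then st.1 ++ [p.1] else st.1),
        pvTGet (PySem.Dict.getD by_cpu p.2 []) "numa_id"))
    ([], none)
  (cpu_order, res.1)

-- ===== PORT B =====
-- sorted({t["numa_id"] …}) = sort of the distinct numa ids; sorted(list of int pairs) =
-- PySem.List.sorted2 with the two projections (Python tuple order); blocks[:-1] = dropLast.
-- sorted({t["numa_id"] for t in topology}): sort of the distinct numa ids
def pvNumas (topology : List (List (String × Int))) : List Int :=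
  PySem.List.sorted (PySem.Set.ofList (topology.map (fun t => pvTGetD t "numa_id"))) (fun x => x)

-- one numa block: sorted (llc,cpu) pairs of that numa's entries (Python tuple order = sorted2),
-- then the cpu components
def pvBlk (topology : List (List (String × Int))) (v : Int) : List Int :=
  (PySem.List.sorted2
    ((topology.filter (fun t => pvTGetD t "numa_id" == v)).map
      (fun t => (pvTGetD t "llc_id", pvTGetD t "cpu_id")))
    (fun p => p.1) (fun p => p.2)).map (fun p => p.2)

def cpu_render_order_py_alt (topology : List (List (String × Int))) (nr_cpus : Int) : List Int × List Int :=
  if topology = [] then (PySem.List.pyRange 0 nr_cpus 1, []) else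
  let by_cpu : PySem.Dict Int (List (String × Int)) := pvByCpu topology
  let blocks0 : List (List Int) :=
    (pvNumas topology).foldl (fun bs numa => bs ++ [pvBlk topology numa]) []
  let missing : List Int :=
    (PySem.List.pyRange 0 nr_cpus 1).filter (fun c => !(PySem.Dict.contains by_cpu c))
  let blocks : List (List Int) := if missing = [] then blocks0 else blocks0 ++ [missing]
  let cpu_order : List Int := blocks.flatten
  let numa_breaks : List Int :=
    ((blocks.dropLast).foldl
      (fun (st : List Int × Int) b => (st.1 ++ [st.2 + (b.length : Int)], st.2 + (b.length : Int)))
      ([], 0)).1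
  (cpu_order, numa_breaks)

-- ===== PRECONDITION & SPEC =====
-- Pre_ excludes (a) inputs where Python A raises KeyError (a topology entry lacking "cpu_id",
-- "numa_id" or "llc_id") and (b) topologies with duplicate cpu_id entries, on which A's
-- numa_breaks accidentally mix the last-write by_cpu dict with rows drawn from every entry —
-- a corner neither behaviour is specified for.
def Pre_cpu_render_order_py (topology : List (List (String × Int))) (nr_cpus : Int) : Prop :=
  (∀ t ∈ topology,
    (PySem.Dict.ofList t).contains "cpu_id" = true ∧
    (PySem.Dict.ofList t).contains "numa_id" = true ∧
    (PySem.Dict.ofList t).contains "llc_id" = true) ∧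
  (topology.map (fun t => pvTGetD t "cpu_id")).Nodup
instance (topology : List (List (String × Int))) (nr_cpus : Int) : Decidable (Pre_cpu_render_order_py topology nr_cpus) := by unfold Pre_cpu_render_order_py; infer_instance

def pvWitness_cpu_render_order_py : (List (List (String × Int))) × Int :=
  ([[("cpu_id", 0), ("numa_id", 0), ("llc_id", 0)], [("cpu_id", 2), ("numa_id", 1), ("llc_id", 0)]], 3)

def Spec_cpu_render_order_py (topology : List (List (String × Int))) (nr_cpus : Int) (out : List Int × List Int) : Prop := out = cpu_render_order_py_alt topology nr_cpus
instance (topology : List (List (String × Int))) (nr_cpus : Int) (out : List Int × List Int) : Decidable (Spec_cpu_render_order_py topology nr_cpus out) := by unfold Spec_cpu_render_order_py; infer_instance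

-- ===== CLAIM (what is proved, stated in full; the proofs are below) =====
def Claim_equal_cpu_render_order_py : Prop := ∀ (topology : List (List (String × Int))) (nr_cpus : Int), Dom_cpu_render_order_py topology nr_cpus → Pre_cpu_render_order_py topology nr_cpus → Spec_cpu_render_order_py topology nr_cpus (cpu_render_order_py topology nr_cpus)

-- ===== LEMMAS AND PROOFS =====

-- A's prev_numa scan, in recursive form over the numa sequence
def pvA (xs : List (Option Int)) (i : Int) (st : List Int × Option Int) : List Int × Option Int :=
  match xs with
  | [] => st
  | x :: xs => pvA xs (i + 1) ((if decide (0 < i) && (x != st.2) then st.1 ++ [i] else st.1), x)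

-- block-start offsets: one break at the start of each block
def pvBr (i : Int) : List (Option Int × List Int) → List Int
  | [] => []
  | p :: ps => i :: pvBr (i + p.2.length) ps

-- running prefix sums of block lengths (B's loop)
def pvCum (off : Int) : List (List Int) → List Int
  | [] => []
  | b :: bs => (off + b.length) :: pvCum (off + b.length) bs

theorem pvA_enumerate (cs : List Int) (n : Int → Option Int) :
    ∀ (i : Int) (st : List Int × Option Int),
    (PySem.List.enumerate cs i).foldl
      (fun (st : List Int × Option Int) p =>
        ((if decide (0 < p.1) && (n p.2 != st.2) then st.1 ++ [p.1] else st.1), n p.2)) st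
      = pvA (cs.map n) i st := by
  induction cs with
  | nil => intro i st; simp [PySem.List.enumerate_nil, pvA]
  | cons c cs ih =>
    intro i st
    rw [PySem.List.enumerate_cons]
    simp only [List.foldl_cons, List.map_cons, pvA]
    exact ih (i + 1) _

theorem pvA_skip (w : Option Int) (n : Nat) :
    ∀ (rest : List (Option Int)) (i : Int) (acc : List Int),
    pvA (List.replicate n w ++ rest) i (acc, w) = pvA rest (i + n) (acc, w) := by
  induction n with
  | zero => intro rest i acc; simp
  | succ n ih =>
    intro rest i acc
    simp only [List.replicate_succ, List.cons_append, pvA, bne_self_eq_false, Bool.and_false,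
      Bool.false_eq_true, if_false]
    rw [ih rest (i + 1) acc]
    congr 1
    push_cast; ring

theorem pvA_blocks (vbs : List (Option Int × List Int)) :
    ∀ (i : Int) (acc : List Int) (v : Option Int), 0 < i →
    (∀ p ∈ vbs, p.2 ≠ []) → List.IsChain (· ≠ ·) (v :: vbs.map Prod.fst) →
    (pvA (vbs.flatMap (fun p => List.replicate p.2.length p.1)) i (acc, v)).1 = acc ++ pvBr i vbs := by
  induction vbs with
  | nil => intro i acc v _ _ _; simp [pvA, pvBr]
  | cons p ps ih =>
    intro i acc v hi h1 hch
    obtain ⟨c, b', hp⟩ := List.exists_cons_of_ne_nil (h1 p (List.mem_cons_self))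
    simp only [List.map_cons] at hch
    have hvw : v ≠ p.1 := (List.isChain_cons_cons.mp hch).1
    have hch' : List.IsChain (· ≠ ·) (p.1 :: ps.map Prod.fst) := (List.isChain_cons_cons.mp hch).2
    have hne : (p.1 != v) = true := by simp [bne_iff_ne]; exact fun h => hvw h.symm
    simp only [List.flatMap_cons, hp, List.length_cons, List.replicate_succ, List.cons_append, pvA,
      hne, Bool.and_true, decide_eq_true_eq, if_pos hi]
    rw [pvA_skip p.1 b'.length _ (i + 1) (acc ++ [i])]
    rw [ih (i + 1 + b'.length) (acc ++ [i]) p.1 (by positivity)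
      (fun q hq => h1 q (List.mem_cons_of_mem _ hq)) hch']
    have hX : i + 1 + (b'.length : Int) = i + (((c :: b').length : Nat) : Int) := by
      simp only [List.length_cons]; push_cast; ring
    rw [hX, pvBr, hp]
    simp [List.append_assoc]

theorem pvA_blocks_zero (p₀ : Option Int × List Int) (ps : List (Option Int × List Int))
    (h1 : ∀ p ∈ p₀ :: ps, p.2 ≠ ([] : List Int))
    (hch : List.IsChain (· ≠ ·) ((p₀ :: ps).map Prod.fst)) :
    (pvA ((p₀ :: ps).flatMap (fun p => List.replicate p.2.length p.1)) 0 ([], none)).1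
      = pvBr (p₀.2.length : Int) ps := by
  obtain ⟨c, b', hp⟩ := List.exists_cons_of_ne_nil (h1 p₀ (List.mem_cons_self))
  simp only [List.map_cons] at hch
  have hg : (decide ((0 : Int) < 0) && (p₀.1 != (none : Option Int))) = false := by simp
  simp only [List.flatMap_cons, hp, List.length_cons, List.replicate_succ, List.cons_append, pvA,
    hg, Bool.false_eq_true, if_false]
  rw [pvA_skip p₀.1 b'.length _ (0 + 1) []]
  rw [pvA_blocks ps (0 + 1 + b'.length) [] p₀.1 (by positivity)
    (fun q hq => h1 q (List.mem_cons_of_mem _ hq)) hch]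
  have hX : 0 + 1 + (b'.length : Int) = (((c :: b').length : Nat) : Int) := by
    simp only [List.length_cons]; push_cast; ring
  rw [hX]
  simp

theorem pv_foldl_cum (bs : List (List Int)) :
    ∀ (acc : List Int) (off : Int),
    (bs.foldl (fun (st : List Int × Int) b => (st.1 ++ [st.2 + (b.length : Int)], st.2 + (b.length : Int))) (acc, off)).1
      = acc ++ pvCum off bs := by
  induction bs with
  | nil => intro acc off; simp [pvCum]
  | cons b bs ih =>
    intro acc off
    simp only [List.foldl_cons]
    rw [ih (acc ++ [off + (b.length : Int)]) (off + b.length), pvCum]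
    simp [List.append_assoc]

theorem pv_cum_dropLast (ps : List (Option Int × List Int)) :
    ∀ (p₀ : Option Int × List Int) (off : Int),
    pvCum off (((p₀ :: ps).map Prod.snd).dropLast) = pvBr (off + p₀.2.length) ps := by
  induction ps with
  | nil => intro p₀ off; simp [pvCum, pvBr]
  | cons p ps ih =>
    intro p₀ off
    simp only [List.map_cons, List.dropLast_cons₂, pvCum, pvBr]
    have := ih p (off + p₀.2.length)
    simp only [List.map_cons] at this
    rw [this]

-- sorted(list of int pairs) via sorted2 is the insertion sort by the lexicographic pair order
theorem pv_sorted2_pairs (xs : List (Int × Int)) :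
    PySem.List.sorted2 xs (fun p => p.1) (fun p => p.2)
      = PySem.List.sorted xs (fun p => toLex p) := by
  rw [PySem.List.sorted_eq_foldl_insertBy]
  simp only [PySem.List.sorted2]
  have h : (fun (a b : Int × Int) => decide (a.1 < b.1) || (!decide (b.1 < a.1) && decide (a.2 < b.2)))
      = (fun (a b : Int × Int) => decide (toLex a < toLex b)) := by
    funext a b
    simp only [Prod.Lex.lt_iff, ofLex_toLex]
    by_cases h1 : a.1 < b.1 <;> by_cases h2 : b.1 < a.1 <;> by_cases h3 : a.2 < b.2 <;>
      simp [h1, h2, h3] <;> omega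
  simp only [if_neg (by decide : ((false : Bool) = true) -> False)]
  rw [h]

-- dict built by the cpu_id-keyed insert loop: lookups
theorem pv_get?_foldl_of_ne (l : List (List (String × Int))) :
    ∀ (d : PySem.Dict Int (List (String × Int))) (k : Int),
    (∀ t ∈ l, pvTGetD t "cpu_id" ≠ k) →
    (l.foldl (fun d t => d.insert (pvTGetD t "cpu_id") t) d).get? k = d.get? k := by
  induction l with
  | nil => intro d k _; rfl
  | cons t l ih =>
    intro d k h
    simp only [List.foldl_cons]
    rw [ih _ k (fun q hq => h q (List.mem_cons_of_mem _ hq))]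
    exact PySem.Dict.get?_insert_of_ne _ _ (h t List.mem_cons_self).symm

theorem pv_get?_byCpu (l : List (List (String × Int)))
    (hnd : (l.map (fun t => pvTGetD t "cpu_id")).Nodup) :
    ∀ (d : PySem.Dict Int (List (String × Int))), ∀ t ∈ l,
    (l.foldl (fun d t => d.insert (pvTGetD t "cpu_id") t) d).get? (pvTGetD t "cpu_id") = some t := by
  induction l with
  | nil => intro d t ht; cases ht
  | cons t0 l ih =>
    rw [List.map_cons, List.nodup_cons] at hnd
    intro d t ht
    rcases List.mem_cons.mp ht with rfl | htl
    · simp only [List.foldl_cons]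
      rw [pv_get?_foldl_of_ne l _ _
        (fun q hq hq2 => hnd.1 (by rw [← hq2]; exact List.mem_map_of_mem hq))]
      exact PySem.Dict.get?_insert_self _ _ _
    · exact ih hnd.2 _ t htl

-- keys present (Pre_) turn t["k"] into 'some (pvTGetD t k)'
theorem pv_tget_eq_some (t : List (String × Int)) (k : String)
    (h : (PySem.Dict.ofList t).contains k = true) : pvTGet t k = some (pvTGetD t k) := by
  rw [PySem.Dict.contains_eq_isSome_get?] at h
  cases hx : pvTGet t k with
  | none => unfold pvTGet at hx; rw [hx] at h; cases h
  | some v => simp [pvTGetD, hx]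

-- partition of the cpu ids into numa fibers is a permutation
theorem pv_partition_perm {α : Type} (f : α → Int) (g : α → Int) :
    ∀ (νs : List Int) (l : List α), νs.Nodup → (∀ t ∈ l, f t ∈ νs) →
    (νs.flatMap (fun ν => (l.filter (fun t => f t == ν)).map g)).Perm (l.map g) := by
  intro νs
  induction νs with
  | nil =>
    intro l _ hcov
    cases l with
    | nil => simp
    | cons t l => cases hcov t List.mem_cons_self
  | cons ν₀ νs ih =>
    intro l hnd hcov
    rw [List.nodup_cons] at hnd
    simp only [List.flatMap_cons]
    have hfib : νs.flatMap (fun ν => (l.filter (fun t => f t == ν)).map g)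
        = νs.flatMap (fun ν => ((l.filter (fun t => !(f t == ν₀))).filter (fun t => f t == ν)).map g) := by
      simp only [List.flatMap_def]
      congr 1
      apply List.map_congr_left
      intro ν hν
      rw [List.filter_filter]
      congr 1
      apply List.filter_congr
      intro t _
      by_cases hf : f t = ν₀
      · have hne : f t ≠ ν := by
          rw [hf]; exact fun h => hnd.1 (h ▸ hν)
        simp [hne]
      · simp [hf]
    rw [hfib]
    have hcov' : ∀ t ∈ l.filter (fun t => !(f t == ν₀)), f t ∈ νs := by
      intro t ht
      rcases List.mem_filter.mp ht with ⟨htl, hne⟩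
      rcases List.mem_cons.mp (hcov t htl) with h | h
      · simp [h] at hne
      · exact h
    have := ih (l.filter (fun t => !(f t == ν₀))) hnd.2 hcov'
    have hperm := (List.filter_append_perm (fun t => f t == ν₀) l).map g
    rw [List.map_append] at hperm
    exact (List.Perm.append_left _ this).trans hperm

-- proof-side Lex view of A's tuple key: Python tuple '<' is the Int ×ₗ Int ×ₗ Int order
def pvAKey (t : List (String × Int)) : Int ×ₗ Int ×ₗ Int :=
  toLex (pvTGetD t "numa_id", toLex (pvTGetD t "llc_id", pvTGetD t "cpu_id"))

-- A's hand-written insertion sort IS PySem.List.sorted by the Lex key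
theorem pv_sortA (topology : List (List (String × Int))) :
    topology.foldl (fun acc t => PySem.List.insertBy (fun a b => pvLex3 (pvATriple a) (pvATriple b)) t acc) []
      = PySem.List.sorted topology pvAKey := by
  rw [PySem.List.sorted_eq_foldl_insertBy]
  have h : (fun (a b : List (String × Int)) => decide (pvAKey a < pvAKey b))
      = (fun a b => pvLex3 (pvATriple a) (pvATriple b)) := by
    funext a b
    simp only [pvAKey, pvLex3, pvATriple, Prod.Lex.lt_iff, ofLex_toLex, beq_eq_decide,
      ← Bool.decide_or, ← Bool.decide_and]
  rw [h]

-- the (numa, llc, cpu) key of a cpu id, read back through by_cpu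
def pvKeyC (topology : List (List (String × Int))) (c : Int) : Int ×ₗ Int ×ₗ Int :=
  toLex (pvTGetD ((pvByCpu topology).getD c []) "numa_id",
    toLex (pvTGetD ((pvByCpu topology).getD c []) "llc_id", c))

theorem pv_getD_byCpu (topology : List (List (String × Int)))
    (hnd : (topology.map (fun t => pvTGetD t "cpu_id")).Nodup)
    (t : List (String × Int)) (ht : t ∈ topology) :
    (pvByCpu topology).getD (pvTGetD t "cpu_id") [] = t := by
  unfold pvByCpu
  rw [PySem.Dict.getD_eq_get?_getD, pv_get?_byCpu topology hnd _ t ht]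
  rfl

theorem pv_keyC_entry (topology : List (List (String × Int)))
    (hnd : (topology.map (fun t => pvTGetD t "cpu_id")).Nodup)
    (t : List (String × Int)) (ht : t ∈ topology) :
    pvKeyC topology (pvTGetD t "cpu_id") = pvAKey t := by
  unfold pvKeyC pvAKey
  rw [pv_getD_byCpu topology hnd t ht]

theorem pv_mem_blk (topology : List (List (String × Int))) (v c : Int)
    (hc : c ∈ pvBlk topology v) :
    ∃ t ∈ topology, pvTGetD t "numa_id" = v ∧ pvTGetD t "cpu_id" = c := by
  unfold pvBlk at hc
  obtain ⟨pr, hpr, hprc⟩ := List.mem_map.mp hc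
  have hpr2 := (PySem.List.sorted2_perm _ _ _ _).subset hpr
  obtain ⟨t, htf, hprt⟩ := List.mem_map.mp hpr2
  obtain ⟨ht, hbeq⟩ := List.mem_filter.mp htf
  refine ⟨t, ht, beq_iff_eq.mp hbeq, ?_⟩
  rw [show pvTGetD t "cpu_id" = ((pvTGetD t "llc_id", pvTGetD t "cpu_id") : Int × Int).2 from rfl,
    hprt, hprc]

theorem pv_blk_entry (topology : List (List (String × Int)))
    (hnd : (topology.map (fun t => pvTGetD t "cpu_id")).Nodup) (v c : Int)
    (hc : c ∈ pvBlk topology v) :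
    (pvByCpu topology).getD c [] ∈ topology ∧
      pvTGetD ((pvByCpu topology).getD c []) "numa_id" = v ∧
      pvTGetD ((pvByCpu topology).getD c []) "cpu_id" = c := by
  obtain ⟨t, ht, hv, hcid⟩ := pv_mem_blk topology v c hc
  have h := pv_getD_byCpu topology hnd t ht
  rw [← hcid, h]
  exact ⟨ht, hv, rfl⟩

theorem pv_keyC_inj (topology : List (List (String × Int))) :
    Function.Injective (pvKeyC topology) := by
  intro a b h
  unfold pvKeyC at h
  simp only [toLex_inj, Prod.mk.injEq] at h
  exact h.2.2

theorem pv_map_keyC_blk (topology : List (List (String × Int)))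
    (hnd : (topology.map (fun t => pvTGetD t "cpu_id")).Nodup) (v : Int) :
    (pvBlk topology v).map (pvKeyC topology)
      = (PySem.List.sorted
          ((topology.filter (fun t => pvTGetD t "numa_id" == v)).map
            (fun t => (pvTGetD t "llc_id", pvTGetD t "cpu_id")))
          (fun p => toLex p)).map (fun pr => toLex (v, toLex pr)) := by
  unfold pvBlk
  rw [pv_sorted2_pairs, List.map_map]
  apply List.map_congr_left
  intro pr hpr
  have hpr2 := (PySem.List.sorted_perm _ _ _).subset hpr
  obtain ⟨t, htf, hprt⟩ := List.mem_map.mp hpr2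
  obtain ⟨ht, hbeq⟩ := List.mem_filter.mp htf
  subst hprt
  show pvKeyC topology (pvTGetD t "cpu_id") = _
  rw [pv_keyC_entry topology hnd t ht]
  unfold pvAKey
  rw [beq_iff_eq.mp hbeq]

theorem pv_pairwise_blk (topology : List (List (String × Int)))
    (hnd : (topology.map (fun t => pvTGetD t "cpu_id")).Nodup) (v : Int) :
    List.Pairwise (fun a b => pvKeyC topology a ≤ pvKeyC topology b) (pvBlk topology v) := by
  rw [← List.pairwise_map (f := pvKeyC topology), pv_map_keyC_blk topology hnd v,
    List.pairwise_map]
  refine List.Pairwise.imp ?_ (PySem.List.sorted_pairwise _ (fun p => toLex p))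
  intro a b h
  exact Prod.Lex.le_iff.mpr (Or.inr ⟨rfl, h⟩)

theorem pv_numas_nodup (topology : List (List (String × Int))) : (pvNumas topology).Nodup :=
  List.Perm.nodup (PySem.List.sorted_perm _ _ _).symm (PySem.Set.nodup_ofList _)

theorem pv_pairwise_LB (topology : List (List (String × Int)))
    (hnd : (topology.map (fun t => pvTGetD t "cpu_id")).Nodup) :
    List.Pairwise (fun a b => pvKeyC topology a ≤ pvKeyC topology b)
      ((pvNumas topology).flatMap (pvBlk topology)) := by
  rw [List.flatMap_def, List.pairwise_flatten]
  constructor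
  · intro b hb
    obtain ⟨v, hv, rfl⟩ := List.mem_map.mp hb
    exact pv_pairwise_blk topology hnd v
  · rw [List.pairwise_map]
    have hle : List.Pairwise (fun a b : Int => a ≤ b) (pvNumas topology) :=
      PySem.List.sorted_pairwise _ (fun x => x)
    have hlt : List.Pairwise (fun a b : Int => a < b) (pvNumas topology) :=
      (hle.and (pv_numas_nodup topology)).imp (fun h => lt_of_le_of_ne h.1 h.2)
    refine List.Pairwise.imp ?_ hlt
    intro v v' hvv x hx y hy
    have hx1 := (pv_blk_entry topology hnd v x hx).2.1
    have hy1 := (pv_blk_entry topology hnd v' y hy).2.1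
    refine le_of_lt (Prod.Lex.lt_iff.mpr (Or.inl ?_))
    simp only [pvKeyC, ofLex_toLex]
    rw [hx1, hy1]
    exact hvv

theorem pv_pairwise_LA (topology : List (List (String × Int)))
    (hnd : (topology.map (fun t => pvTGetD t "cpu_id")).Nodup) :
    List.Pairwise (fun a b => pvKeyC topology a ≤ pvKeyC topology b)
      ((PySem.List.sorted topology pvAKey).map (fun t => pvTGetD t "cpu_id")) := by
  rw [List.pairwise_map]
  refine List.Pairwise.imp_of_mem ?_ (PySem.List.sorted_pairwise topology pvAKey)
  intro a b ha hb h
  rw [pv_keyC_entry topology hnd a ((PySem.List.sorted_perm _ _ _).subset ha),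
    pv_keyC_entry topology hnd b ((PySem.List.sorted_perm _ _ _).subset hb)]
  exact h

theorem pv_perm_LB (topology : List (List (String × Int))) :
    ((pvNumas topology).flatMap (pvBlk topology)).Perm
      (topology.map (fun t => pvTGetD t "cpu_id")) := by
  have h1 : ∀ v ∈ pvNumas topology,
      (pvBlk topology v).Perm
        ((topology.filter (fun t => pvTGetD t "numa_id" == v)).map (fun t => pvTGetD t "cpu_id")) := by
    intro v _
    unfold pvBlk
    have h := (PySem.List.sorted2_perm
      ((topology.filter (fun t => pvTGetD t "numa_id" == v)).map
        (fun t => (pvTGetD t "llc_id", pvTGetD t "cpu_id")))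
      (fun p => p.1) (fun p => p.2) false).map (fun p : Int × Int => p.2)
    rw [List.map_map] at h
    exact h
  refine (List.Perm.flatMap_left _ h1).trans ?_
  apply pv_partition_perm _ _ _ _ (pv_numas_nodup topology)
  intro t ht
  exact ((PySem.List.sorted_perm _ _ _).mem_iff).mpr
    ((PySem.Set.mem_ofList _ _).mpr (List.mem_map_of_mem ht))

theorem pv_blk_ne_nil (topology : List (List (String × Int))) (v : Int)
    (hv : v ∈ pvNumas topology) : pvBlk topology v ≠ [] := by
  obtain ⟨t, ht, hts⟩ := List.mem_map.mp
    ((PySem.Set.mem_ofList _ _).mp ((PySem.List.sorted_perm _ _ _).subset hv))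
  have htf : t ∈ topology.filter (fun t => pvTGetD t "numa_id" == v) :=
    List.mem_filter.mpr ⟨ht, beq_iff_eq.mpr hts⟩
  have h1 : (pvTGetD t "llc_id", pvTGetD t "cpu_id")
      ∈ PySem.List.sorted2
        ((topology.filter (fun t => pvTGetD t "numa_id" == v)).map
          (fun t => (pvTGetD t "llc_id", pvTGetD t "cpu_id")))
        (fun p => p.1) (fun p => p.2) :=
    ((PySem.List.sorted2_perm _ _ _ _).mem_iff).mpr (List.mem_map_of_mem htf)
  exact List.ne_nil_of_mem (List.mem_map_of_mem h1)

-- ===== VERDICT (by name: the statement is the Claim_ definition above) =====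
theorem cpu_render_order_py_spec : Claim_equal_cpu_render_order_py := by
  intro topology nr_cpus _ hpre
  obtain ⟨hkeys, hnd⟩ := hpre
  unfold Spec_cpu_render_order_py cpu_render_order_py cpu_render_order_py_alt
  by_cases ht : topology = []
  · simp [ht]
  · simp only [if_neg ht, Prod.mk.injEq]
    rw [pv_sortA topology]
    set M := (PySem.List.pyRange 0 nr_cpus 1).filter
      (fun c => !(PySem.Dict.contains (pvByCpu topology) c)) with hM
    -- A's seen-set test coincides with the by_cpu containment test
    have hpt : ∀ c : Int, (!(PySem.Set.contains (PySem.Set.ofList (pvByCpu topology).keys) c))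
        = (!(PySem.Dict.contains (pvByCpu topology) c)) := by
      intro c
      congr 1
      by_cases hc : (pvByCpu topology).contains c = true
      · rw [hc]
        exact (PySem.Set.contains_iff _ _).mpr
          ((PySem.Set.mem_ofList _ _).mpr ((PySem.Dict.contains_iff_mem_keys _ _).mp hc))
      · have hc' : (pvByCpu topology).contains c = false := by
          cases h2 : (pvByCpu topology).contains c
          · rfl
          · exact absurd h2 hc
        rw [hc']
        cases h2 : PySem.Set.contains (PySem.Set.ofList (pvByCpu topology).keys) c
        · rfl
        · exact absurd ((PySem.Dict.contains_iff_mem_keys _ _).mpr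
            ((PySem.Set.mem_ofList _ _).mp ((PySem.Set.contains_iff _ _).mp h2)))
            (by rw [hc']; simp)
    -- A's missing-append loop is 'known order ++ M'
    have hAorder : (PySem.List.pyRange 0 nr_cpus 1).foldl
        (fun acc c => if !(PySem.Set.contains (PySem.Set.ofList (pvByCpu topology).keys) c)
          then acc ++ [c] else acc)
        ((PySem.List.sorted topology pvAKey).map (fun t => pvTGetD t "cpu_id"))
        = (PySem.List.sorted topology pvAKey).map (fun t => pvTGetD t "cpu_id") ++ M := by
      rw [PySem.List.foldl_append_if_eq_filter]
      congr 1
      exact List.filter_congr (fun c _ => hpt c)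
    -- the two known orders are equal: same multiset, both sorted by the injective key
    have horder0 : (PySem.List.sorted topology pvAKey).map (fun t => pvTGetD t "cpu_id")
        = (pvNumas topology).flatMap (pvBlk topology) :=
      PySem.List.eq_of_perm_of_pairwise_le_of_injective (pvKeyC topology) (pv_keyC_inj topology)
        (((PySem.List.sorted_perm topology pvAKey false).map (fun t => pvTGetD t "cpu_id")).trans
          (pv_perm_LB topology).symm)
        (pv_pairwise_LA topology hnd) (pv_pairwise_LB topology hnd)
    have hB0 : (pvNumas topology).foldl (fun bs numa => bs ++ [pvBlk topology numa])
        ([] : List (List Int)) = (pvNumas topology).map (pvBlk topology) := by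
      simpa using PySem.List.foldl_append_singleton_eq_map (pvBlk topology) (pvNumas topology) []
    -- the value-decorated block list
    set VB := (pvNumas topology).map (fun v => ((some v : Option Int), pvBlk topology v))
      ++ (if M = [] then [] else [((none : Option Int), M)]) with hVB
    have hsnd : (if M = [] then (pvNumas topology).map (pvBlk topology)
          else (pvNumas topology).map (pvBlk topology) ++ [M]) = VB.map Prod.snd := by
      by_cases hm : M = [] <;> simp [hVB, hm, List.map_map]
    have hflatten : (VB.map Prod.snd).flatten = (pvNumas topology).flatMap (pvBlk topology) ++ M := by
      rw [← hsnd]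
      by_cases hm : M = [] <;> simp [hm, List.flatMap_def]
    have hnums_ne : pvNumas topology ≠ [] := by
      obtain ⟨t0, l0, htl⟩ := List.exists_cons_of_ne_nil ht
      refine List.ne_nil_of_mem (a := pvTGetD t0 "numa_id") ?_
      exact ((PySem.List.sorted_perm _ _ _).mem_iff).mpr
        ((PySem.Set.mem_ofList _ _).mpr (List.mem_map_of_mem (by rw [htl]; exact List.mem_cons_self)))
    obtain ⟨v0, vs, hnum⟩ := List.exists_cons_of_ne_nil hnums_ne
    have hVBcons : VB = ((some v0 : Option Int), pvBlk topology v0)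
        :: (vs.map (fun v => ((some v : Option Int), pvBlk topology v))
            ++ (if M = [] then [] else [((none : Option Int), M)])) := by
      rw [hVB, hnum]; rfl
    have h1 : ∀ p ∈ VB, p.2 ≠ ([] : List Int) := by
      intro p hp
      rcases List.mem_append.mp (hVB ▸ hp) with hp1 | hp2
      · obtain ⟨v, hv, rfl⟩ := List.mem_map.mp hp1
        exact pv_blk_ne_nil topology v hv
      · by_cases hm : M = []
        · rw [if_pos hm] at hp2; cases hp2
        · rw [if_neg hm] at hp2
          rw [List.mem_singleton.mp hp2]
          exact hm
    have hch : List.IsChain (· ≠ ·) (VB.map Prod.fst) := by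
      have hfst : VB.map Prod.fst = (pvNumas topology).map some
          ++ (if M = [] then [] else [(none : Option Int)]) := by
        by_cases hm : M = [] <;> simp [hVB, hm, List.map_map]
      have hnd2 : (VB.map Prod.fst).Nodup := by
        rw [hfst]
        by_cases hm : M = []
        · rw [if_pos hm, List.append_nil]
          exact ((pv_numas_nodup topology).map (Option.some_injective _))
        · rw [if_neg hm]
          refine List.Nodup.append ((pv_numas_nodup topology).map (Option.some_injective _))
            (List.nodup_singleton _) ?_
          intro a ha hb
          obtain ⟨v, _, rfl⟩ := List.mem_map.mp ha
          simp at hb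
      exact List.Pairwise.isChain hnd2
    constructor
    · -- the cpu_order components
      rw [hAorder, horder0, hB0, hsnd, hflatten]
    · -- the numa_breaks components
      rw [hAorder, horder0, ← hflatten]
      rw [pvA_enumerate ((VB.map Prod.snd).flatten)
        (fun c => pvTGet (PySem.Dict.getD (pvByCpu topology) c []) "numa_id") 0 ([], none)]
      have hmapn : ((VB.map Prod.snd).flatten).map
            (fun c => pvTGet (PySem.Dict.getD (pvByCpu topology) c []) "numa_id")
          = VB.flatMap (fun p => List.replicate p.2.length p.1) := by
        rw [List.map_flatten, List.map_map, List.flatMap_def]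
        congr 1
        apply List.map_congr_left
        intro p hp
        show (p.2).map (fun c => pvTGet (PySem.Dict.getD (pvByCpu topology) c []) "numa_id")
          = List.replicate p.2.length p.1
        rcases List.mem_append.mp (hVB ▸ hp) with hp1 | hp2
        · obtain ⟨v, hv, rfl⟩ := List.mem_map.mp hp1
          apply List.map_eq_replicate_iff.mpr
          intro c hc
          have he := pv_blk_entry topology hnd v c hc
          rw [pv_tget_eq_some _ _ ((hkeys _ he.1).2.1), he.2.1]
        · by_cases hm : M = []
          · rw [if_pos hm] at hp2; cases hp2
          · rw [if_neg hm] at hp2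
            rw [List.mem_singleton.mp hp2]
            apply List.map_eq_replicate_iff.mpr
            intro c hc
            rw [hM] at hc
            have hcf := (List.mem_filter.mp hc).2
            have hcf' : (pvByCpu topology).contains c = false := by
              cases h2 : (pvByCpu topology).contains c
              · rfl
              · rw [h2] at hcf; cases hcf
            rw [PySem.Dict.getD_of_not_contains _ _ hcf']
            rfl
      rw [hmapn, hVBcons]
      rw [pvA_blocks_zero _ _ (hVBcons ▸ h1) (hVBcons ▸ hch)]
      rw [hB0, hsnd, hVBcons]
      rw [pv_foldl_cum, pv_cum_dropLast]
      simp
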